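-- pv_equiv track=rewrite | github.com/levelup-fpga/dev_levelup_shared | fpga_rtl/constant_multiplier_package/explore_mult.py | adder_tree_depth
-- ===== SOURCE A (Python) =====
-- def adder_tree_depth(num_terms: int) -> int:
--     if num_terms <= 1:
--         return 0
--     depth = 0
--     n = num_terms
--     while n > 1:
--         n = (n + 1) // 2
--         depth += 1
--     return depth
-- ===== SOURCE B (Python) =====
-- def adder_tree_depth(num_terms: int) -> int:
--     if num_terms <= 1:
--         return 0
--     return (num_terms - 1).bit_length()
-- ===== Notes on version B (the rewrite author's own statement) =====
-- stated objective: idiomatic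
-- what changed: Replaces the halving while-loop with a single closed-form bit_length call on num_terms - 1, keeping the small-input guard unchanged.
import Mathlib
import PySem

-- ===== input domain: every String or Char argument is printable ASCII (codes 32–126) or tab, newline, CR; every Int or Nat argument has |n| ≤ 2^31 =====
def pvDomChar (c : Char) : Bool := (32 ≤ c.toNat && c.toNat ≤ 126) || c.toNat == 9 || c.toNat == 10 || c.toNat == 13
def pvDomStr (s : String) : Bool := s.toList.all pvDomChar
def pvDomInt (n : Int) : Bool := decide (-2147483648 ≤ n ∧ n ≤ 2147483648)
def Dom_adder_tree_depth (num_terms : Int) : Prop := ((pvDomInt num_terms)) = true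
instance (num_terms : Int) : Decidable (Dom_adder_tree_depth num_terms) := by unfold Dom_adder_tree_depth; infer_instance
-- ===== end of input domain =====

-- B replaces A's halving while-loop by the closed form (num_terms - 1).bit_length(); same guard, same values.

-- ===== PORT A =====
-- the while-loop of A: while n > 1: n = (n + 1) // 2; depth += 1
def adderLoop (n : Int) (depth : Int) : Int :=
  if h : n > 1 then adderLoop (PySem.Int.floordiv (n + 1) 2) (depth + 1) else depth
termination_by n.toNat
decreasing_by
  have := PySem.Int.floordiv_eq_ediv_of_pos (a := n + 1) (b := 2) (by omega)
  omega

def adder_tree_depth (num_terms : Int) : Int :=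
  if num_terms ≤ 1 then 0
  else adderLoop num_terms 0

-- ===== PORT B =====
def adder_tree_depth_alt (num_terms : Int) : Int :=
  if num_terms ≤ 1 then 0
  else (PySem.Int.bitLength (num_terms - 1) : Int)

-- ===== PRECONDITION & SPEC =====
def Spec_adder_tree_depth (num_terms : Int) (out : Int) : Prop := out = adder_tree_depth_alt num_terms
instance (num_terms : Int) (out : Int) : Decidable (Spec_adder_tree_depth num_terms out) := by unfold Spec_adder_tree_depth; infer_instance

-- ===== CLAIM (what is proved, stated in full; the proofs are below) =====
def Claim_equal_adder_tree_depth : Prop := ∀ (num_terms : Int), Dom_adder_tree_depth num_terms → Spec_adder_tree_depth num_terms (adder_tree_depth num_terms)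

-- ===== LEMMAS AND PROOFS =====

-- loop invariant: for n > 1 the loop returns depth + bit_length (n - 1)
theorem adderLoop_eq (k : Nat) : ∀ (n d : Int), n.toNat ≤ k → 1 < n →
    adderLoop n d = d + (PySem.Int.bitLength (n - 1) : Int) := by
  induction k with
  | zero => intro n d hle h; omega
  | succ k ih =>
    intro n d hle h
    rw [adderLoop, dif_pos h]
    have hdiv : PySem.Int.floordiv (n + 1) 2 = (n + 1) / 2 :=
      PySem.Int.floordiv_eq_ediv_of_pos (by omega)
    have hdiv' : PySem.Int.floordiv (n - 1) 2 = (n - 1) / 2 :=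
      PySem.Int.floordiv_eq_ediv_of_pos (by omega)
    have hbl : PySem.Int.bitLength (n - 1) = PySem.Int.bitLength (PySem.Int.floordiv (n - 1) 2) + 1 :=
      PySem.Int.bitLength_of_pos (by omega)
    by_cases h2 : 1 < PySem.Int.floordiv (n + 1) 2
    · have hle' : (PySem.Int.floordiv (n + 1) 2).toNat ≤ k := by rw [hdiv]; omega
      rw [ih _ (d + 1) hle' h2]
      have heq : PySem.Int.floordiv (n + 1) 2 - 1 = PySem.Int.floordiv (n - 1) 2 := by
        rw [hdiv, hdiv']; omega
      rw [heq, hbl]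
      push_cast
      ring
    · -- then n = 2 (since n > 1 and (n+1)//2 ≤ 1)
      have hn2 : n = 2 := by rw [hdiv] at h2; omega
      subst hn2
      have e1 : PySem.Int.floordiv ((2:Int) + 1) 2 = 1 := by decide
      have e2 : PySem.Int.bitLength ((2:Int) - 1) = 1 := by decide
      rw [e1, e2, adderLoop]
      norm_num

-- ===== VERDICT (by name: the statement is the Claim_ definition above) =====
theorem adder_tree_depth_spec : Claim_equal_adder_tree_depth := by
  intro n _
  unfold Spec_adder_tree_depth adder_tree_depth adder_tree_depth_alt
  by_cases h : n ≤ 1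
  · simp [h]
  · rw [if_neg h, if_neg h, adderLoop_eq n.toNat n 0 le_rfl (by omega), zero_add]
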